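-- pv_equiv track=rewrite | github.com/daniel-reich/ubiquitous-fiesta | YRwZvg5Pkgw4pEWC5_15.py | flick_switch
-- ===== SOURCE A (Python) =====
-- def flick_switch(lst):
--   res = []
--   sign = True
--   for i in lst:
--     if i  != 'flick':
--       res.append(sign)
--     else:
--       sign = not sign
--       res.append(sign)
--
--   return res
-- ===== SOURCE B (Python) =====
-- def flick_switch(lst):
--     counts = []
--     c = 0
--     for x in lst:
--         c += (x == 'flick')
--         counts.append(c)
--     return [c % 2 == 0 for c in counts]
-- ===== Notes on version B (the rewrite author's own statement) =====
-- stated objective: alternative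
-- what changed: Replaces the mutable boolean toggle with a two-phase counting computation: first build the prefix-count list of 'flick' occurrences, then map each count to its parity (even -> True).
import Mathlib
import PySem

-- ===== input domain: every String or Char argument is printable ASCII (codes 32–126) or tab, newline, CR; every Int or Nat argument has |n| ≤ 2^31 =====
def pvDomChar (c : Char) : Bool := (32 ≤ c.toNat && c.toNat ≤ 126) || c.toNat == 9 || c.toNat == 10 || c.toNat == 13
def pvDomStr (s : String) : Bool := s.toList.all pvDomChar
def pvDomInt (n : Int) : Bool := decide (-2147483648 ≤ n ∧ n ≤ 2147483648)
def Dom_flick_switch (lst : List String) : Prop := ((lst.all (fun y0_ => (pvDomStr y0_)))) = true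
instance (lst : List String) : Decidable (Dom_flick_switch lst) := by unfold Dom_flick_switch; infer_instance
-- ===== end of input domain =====

-- B replaces A's mutable boolean toggle by prefix-counting 'flick' occurrences and mapping each count to its parity (alternative decomposition, same cost).


-- ===== PORT A =====
-- literal port of A: fold over the list carrying (res, sign)
def flick_switch (lst : List String) : List Bool :=
  (lst.foldl (fun (st : List Bool × Bool) i =>
      if i ≠ "flick" then (st.1 ++ [st.2], st.2)
      else (st.1 ++ [!st.2], !st.2)) ([], true)).1

-- ===== PORT B =====
-- phase 1 of B: the prefix-count list of 'flick' occurrences (c is the running count)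
def flickPrefCounts : List String → Nat → List Nat
  | [], _ => []
  | x :: xs, c =>
      let c' := c + (if x = "flick" then 1 else 0)
      c' :: flickPrefCounts xs c'

-- phase 2 of B: map each prefix count to its parity
def flick_switch_alt (lst : List String) : List Bool :=
  (flickPrefCounts lst 0).map (fun c => c % 2 == 0)

-- ===== PRECONDITION & SPEC =====
def Spec_flick_switch (lst : List String) (out : List Bool) : Prop := out = flick_switch_alt lst
instance (lst : List String) (out : List Bool) : Decidable (Spec_flick_switch lst out) := by unfold Spec_flick_switch; infer_instance

-- ===== CLAIM (what is proved, stated in full; the proofs are below) =====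
def Claim_equal_flick_switch : Prop := ∀ (lst : List String), Dom_flick_switch lst → Spec_flick_switch lst (flick_switch lst)

-- ===== LEMMAS AND PROOFS =====
lemma flick_main (lst : List String) : ∀ (acc : List Bool) (c : Nat),
    (lst.foldl (fun (st : List Bool × Bool) i =>
      if i ≠ "flick" then (st.1 ++ [st.2], st.2)
      else (st.1 ++ [!st.2], !st.2)) (acc, c % 2 == 0)).1
    = acc ++ (flickPrefCounts lst c).map (fun k => k % 2 == 0) := by
  induction lst with
  | nil => intro acc c; simp [flickPrefCounts]
  | cons x xs ih =>
    intro acc c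
    by_cases hx : x = "flick"
    · have hpar : (!(c % 2 == 0)) = ((c + 1) % 2 == 0) := by
        by_cases h : c % 2 = 0
        · have h1 : (c + 1) % 2 = 1 := by omega
          simp [h, h1]
        · have h0 : c % 2 = 1 := by omega
          have h1 : (c + 1) % 2 = 0 := by omega
          simp [h0, h1]
      simp only [List.foldl, hx, flickPrefCounts, ne_eq, not_true_eq_false, if_false]
      rw [hpar, ih (acc ++ [(c + 1) % 2 == 0]) (c + 1)]
      simp
    · simp only [List.foldl, flickPrefCounts, ne_eq, hx, not_false_eq_true, if_true]
      rw [ih (acc ++ [c % 2 == 0]) c]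
      simp

-- ===== VERDICT (by name: the statement is the Claim_ definition above) =====
theorem flick_switch_spec : Claim_equal_flick_switch := by
  intro lst _
  unfold Spec_flick_switch flick_switch flick_switch_alt
  have := flick_main lst [] 0
  simpa using this
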